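-- pv_equiv track=rewrite | github.com/saptarsi96/Codes | gcc33.py | find_min_days
-- ===== SOURCE A (Python) =====
-- def find_min_days(prices, profit):
--     ans=[]
--     for query in profit:
--         start = -1
--         end = 99999
--         for i in range(0,len(prices)):
--             for j in range(i+1,len(prices)):
--                 if prices[j] == prices[i]+query:
--                     if max(start,i+1) > min(end,j+1):
--                         continue
--                     else:
--                         start = max(start,i+1)
--                         end = min(end,j+1)
--         ans.append(start)
--         ans.append(end)
--     return ans
-- ===== SOURCE B (Python) =====
-- def find_min_days(prices, profit):
--     # Index positions of each price once; per (query, i) binary-search the single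
--     # relevant partner j instead of scanning all j > i.
--     n = len(prices)
--     pos = {}
--     for idx, p in enumerate(prices):
--         pos.setdefault(p, []).append(idx)
--     ans = []
--     for query in profit:
--         start, end = -1, 99999
--         for i in range(n):
--             s = max(start, i + 1)
--             if s > end:
--                 continue
--             lst = pos.get(prices[i] + query, [])
--             lo = max(i + 1, s - 1)
--             a, b = 0, len(lst)
--             while a < b:
--                 m = (a + b) // 2
--                 if lst[m] < lo:
--                     a = m + 1
--                 else:
--                     b = m
--             if a < len(lst):
--                 start, end = s, min(end, lst[a] + 1)
--         ans.extend((start, end))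
--     return ans
-- ===== Notes on version B (the rewrite author's own statement) =====
-- stated objective: faster
-- what changed: B builds a value->sorted-positions index once and, per query and start index i, binary-searches the single first compatible partner j (a proved invariant shows only that pair can change A's running window), replacing A's per-query nested i,j pair scan.
import Mathlib
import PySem

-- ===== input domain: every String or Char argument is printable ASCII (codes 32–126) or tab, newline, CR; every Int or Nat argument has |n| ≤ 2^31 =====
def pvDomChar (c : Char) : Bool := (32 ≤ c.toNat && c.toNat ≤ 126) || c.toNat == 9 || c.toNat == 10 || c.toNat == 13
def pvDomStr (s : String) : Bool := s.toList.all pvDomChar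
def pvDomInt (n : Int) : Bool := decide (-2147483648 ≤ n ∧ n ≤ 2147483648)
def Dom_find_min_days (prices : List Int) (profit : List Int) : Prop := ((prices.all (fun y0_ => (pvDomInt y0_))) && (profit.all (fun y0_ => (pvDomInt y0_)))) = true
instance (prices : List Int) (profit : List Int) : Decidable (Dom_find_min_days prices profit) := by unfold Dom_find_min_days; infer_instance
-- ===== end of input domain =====

-- B indexes each price's positions in a dict once and, per query and i, binary-searches the
-- single relevant partner j (only the first compatible match can change A's window state).

-- ===== PORT A =====
def find_min_days (prices : List Int) (profit : List Int) : List Int :=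
  profit.foldl (fun ans query =>
    let st := (PySem.List.pyRange 0 prices.length 1).foldl (fun st i =>
      (PySem.List.pyRange (i+1) prices.length 1).foldl (fun (st : Int × Int) j =>
        if PySem.List.pyGetD prices j 0 == PySem.List.pyGetD prices i 0 + query then
          if max st.1 (i+1) > min st.2 (j+1) then st
          else (max st.1 (i+1), min st.2 (j+1))
        else st) st) ((-1 : Int), (99999 : Int))
    (ans ++ [st.1]) ++ [st.2]) []

-- ===== PORT B =====
-- the hand-written while-loop binary search of Source B (first index r in [a,b) with lst[r] ≥ lo);
-- the loop runs at most b - a times, so a fuel of b - a makes the recursion structural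
def pvBsearch (lst : List Int) (lo : Int) (a b fuel : Nat) : Nat :=
  match fuel with
  | 0 => a
  | fuel+1 =>
    if a < b then
      if lst.getD ((a + b) / 2) 0 < lo then pvBsearch lst lo ((a + b) / 2 + 1) b fuel
      else pvBsearch lst lo a ((a + b) / 2) fuel
    else a

def find_min_days_alt (prices : List Int) (profit : List Int) : List Int :=
  let pos := (PySem.List.enumerate prices 0).foldl
      (fun d p => d.modify p.2 [] (fun l => l ++ [p.1])) PySem.Dict.empty
  profit.foldl (fun ans query =>
    let st := (PySem.List.pyRange 0 prices.length 1).foldl (fun (st : Int × Int) i =>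
      let s := max st.1 (i + 1)
      if s > st.2 then st
      else
        let lst := pos.getD (PySem.List.pyGetD prices i 0 + query) []
        let lo := max (i + 1) (s - 1)
        let r := pvBsearch lst lo 0 lst.length lst.length
        if r < lst.length then (s, min st.2 (lst.getD r 0 + 1)) else st)
      ((-1 : Int), (99999 : Int))
    ans ++ [st.1, st.2]) []

-- ===== PRECONDITION & SPEC =====
def Spec_find_min_days (prices : List Int) (profit : List Int) (out : List Int) : Prop := out = find_min_days_alt prices profit
instance (prices : List Int) (profit : List Int) (out : List Int) : Decidable (Spec_find_min_days prices profit out) := by unfold Spec_find_min_days; infer_instance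

-- ===== CLAIM (what is proved, stated in full; the proofs are below) =====
def Claim_equal_find_min_days : Prop := ∀ (prices : List Int) (profit : List Int), Dom_find_min_days prices profit → Spec_find_min_days prices profit (find_min_days prices profit)

-- ===== LEMMAS AND PROOFS =====

-- A's innermost loop body (for a fixed query and i)
def pvStepA (prices : List Int) (query i : Int) (st : Int × Int) (j : Int) : Int × Int :=
  if PySem.List.pyGetD prices j 0 == PySem.List.pyGetD prices i 0 + query then
    if max st.1 (i+1) > min st.2 (j+1) then st
    else (max st.1 (i+1), min st.2 (j+1))
  else st

-- B's position dictionary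
def pvPos (prices : List Int) : PySem.Dict Int (List Int) :=
  (PySem.List.enumerate prices 0).foldl
      (fun d p => d.modify p.2 [] (fun l => l ++ [p.1])) PySem.Dict.empty

-- B's per-i step (for a fixed query)
def pvStepB (prices : List Int) (query : Int) (st : Int × Int) (i : Int) : Int × Int :=
  let s := max st.1 (i + 1)
  if s > st.2 then st
  else
    let lst := (pvPos prices).getD (PySem.List.pyGetD prices i 0 + query) []
    let lo := max (i + 1) (s - 1)
    let r := pvBsearch lst lo 0 lst.length lst.length
    if r < lst.length then (s, min st.2 (lst.getD r 0 + 1)) else st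

-- the position dictionary holds, for each value, the ascending list of its indices
theorem pvPos_getD (prices : List Int) (v : Int) :
    (pvPos prices).getD v [] =
      (PySem.List.pyRange 0 prices.length 1).filter (fun j => PySem.List.pyGetD prices j 0 == v) := by
  have h := PySem.Dict.getD_foldl_modify_append
    (l := (PySem.List.enumerate prices 0).map (fun p => (p.2, p.1)))
    (d := PySem.Dict.empty) (c := v)
  rw [List.foldl_map] at h
  unfold pvPos
  simp only [h, PySem.Dict.getD_empty, List.nil_append]
  rw [PySem.List.enumerate_eq_map_pyRange (d := 0)]
  simp [List.filter_map, List.map_map, Function.comp_def]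

-- binary-search boundary invariant
theorem pvBsearch_spec (lst : List Int) (lo : Int) (fuel a b : Nat)
    (hfuel : b - a ≤ fuel) (hb : b ≤ lst.length) (hab : a ≤ b)
    (hmono : ∀ k k', k ≤ k' → k' < lst.length → lst.getD k 0 ≤ lst.getD k' 0)
    (h1 : ∀ k, k < a → lst.getD k 0 < lo)
    (h2 : ∀ k, b ≤ k → k < lst.length → lo ≤ lst.getD k 0) :
    (∀ k, k < pvBsearch lst lo a b fuel → lst.getD k 0 < lo) ∧
      pvBsearch lst lo a b fuel ≤ lst.length ∧
      (∀ k, pvBsearch lst lo a b fuel ≤ k → k < lst.length → lo ≤ lst.getD k 0) := by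
  induction fuel generalizing a b with
  | zero =>
      have hba : a = b := by omega
      exact ⟨h1, by simp only [pvBsearch]; omega,
        fun k hk hklen => h2 k (by simp only [pvBsearch] at hk; omega) hklen⟩
  | succ fuel ih =>
      simp only [pvBsearch]
      by_cases hlt : a < b
      · rw [if_pos hlt]
        by_cases hm : lst.getD ((a + b) / 2) 0 < lo
        · rw [if_pos hm]
          exact ih _ _ (by omega) hb (by omega)
            (fun k hk => lt_of_le_of_lt (hmono k ((a+b)/2) (by omega) (by omega)) hm)
            h2
        · rw [if_neg hm]
          exact ih _ _ (by omega) (by omega) (by omega) h1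
            (fun k hk hklen => le_trans (le_of_not_gt hm) (hmono ((a+b)/2) k hk hklen))
      · rw [if_neg hlt]
        exact ⟨h1, by omega, fun k hk hklen => h2 k (by omega) hklen⟩

-- a boundary index determines find? on the list
theorem pvFind_of_boundary (lst : List Int) (lo : Int) (r : Nat)
    (hr : r ≤ lst.length)
    (h1 : ∀ k, k < r → lst.getD k 0 < lo)
    (h2 : ∀ k, r ≤ k → k < lst.length → lo ≤ lst.getD k 0) :
    lst.find? (fun x => decide (lo ≤ x)) =
      if r < lst.length then some (lst.getD r 0) else none := by
  induction lst generalizing r with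
  | nil => simp at hr; simp [hr]
  | cons x xs ih =>
      cases r with
      | zero =>
          have : lo ≤ x := h2 0 (le_refl _) (by simp)
          simp [List.find?, this]
      | succ r' =>
          have hx : ¬ lo ≤ x := by have := h1 0 (Nat.succ_pos _); simp at this; omega
          have := ih r' (by simpa using hr)
            (fun k hk => by have := h1 (k+1) (by omega); simpa using this)
            (fun k hk hklen => by
              have := h2 (k+1) (by omega) (by simpa using hklen); simpa using this)
          simp only [List.find?, hx, decide_false]
          rw [this]
          simp

-- find? distributes over filter
theorem pvFind_filter (p q : Int → Bool) (l : List Int) :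
    (l.filter p).find? q = l.find? (fun a => p a && q a) := by
  induction l with
  | nil => rfl
  | cons x xs ih =>
      by_cases hp : p x
      · simp only [List.filter_cons, hp, if_true, List.find?, Bool.true_and]
        cases hq : q x <;> simp [ih]
      · simp [hp, List.find?, ih]

-- once the window already ends before position i+1, A's inner loop is a no-op
theorem pvScanA_stuck (prices : List Int) (query i : Int) (js : List Int) (s0 e0 : Int)
    (h : e0 < max s0 (i+1)) :
    js.foldl (pvStepA prices query i) (s0, e0) = (s0, e0) := by
  induction js with
  | nil => rfl
  | cons j js ih =>
      have hstep : pvStepA prices query i (s0, e0) j = (s0, e0) := by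
        unfold pvStepA
        split
        · rw [if_pos (by simp; omega)]
        · rfl
      simpa [hstep] using ih

-- after the first compatible match the state absorbs all later matches
theorem pvScanA_absorb (prices : List Int) (query i : Int) (js : List Int) (s e : Int)
    (hs : i + 1 ≤ s) (hse : s ≤ e) (hj : ∀ j ∈ js, e ≤ j + 1) :
    js.foldl (pvStepA prices query i) (s, e) = (s, e) := by
  induction js with
  | nil => rfl
  | cons j js ih =>
      have hej : e ≤ j + 1 := hj j (by simp)
      have hstep : pvStepA prices query i (s, e) j = (s, e) := by
        unfold pvStepA
        split
        · rw [if_neg (by simp; omega)]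
          simp only [Prod.mk.injEq]
          constructor <;> omega
        · rfl
      rw [List.foldl_cons, hstep]
      exact ih (fun j' hj' => hj j' (by simp [hj']))

-- A's inner loop = its first compatible match
theorem pvScanA (prices : List Int) (query i : Int) (js : List Int) (s0 e0 : Int)
    (hsort : js.Pairwise (· < ·)) (hmem : ∀ j ∈ js, i + 1 ≤ j)
    (hse : s0 ≤ e0) (hle : max s0 (i+1) ≤ e0) :
    js.foldl (pvStepA prices query i) (s0, e0) =
      match js.find? (fun j => (PySem.List.pyGetD prices j 0 == PySem.List.pyGetD prices i 0 + query)
                       && decide (max (i+1) (max s0 (i+1) - 1) ≤ j)) with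
      | none => (s0, e0)
      | some j => (max s0 (i+1), min e0 (j + 1)) := by
  induction js with
  | nil => rfl
  | cons j js ih =>
      rw [List.foldl_cons, List.find?]
      have hij : i + 1 ≤ j := hmem j (by simp)
      by_cases hm : PySem.List.pyGetD prices j 0 == PySem.List.pyGetD prices i 0 + query
      · by_cases hcomp : max (i+1) (max s0 (i+1) - 1) ≤ j
        · -- first compatible match: A commits the window, the rest is absorbed
          have hstep : pvStepA prices query i (s0, e0) j = (max s0 (i+1), min e0 (j+1)) := by
            unfold pvStepA
            rw [if_pos hm, if_neg (by simp; omega)]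
          rw [hstep]
          have : ((PySem.List.pyGetD prices j 0 == PySem.List.pyGetD prices i 0 + query)
                   && decide (max (i+1) (max s0 (i+1) - 1) ≤ j)) = true := by
            simp [hm, hcomp]
          rw [this]
          exact pvScanA_absorb prices query i js _ _ (by omega) (by omega)
            (fun j' hj' => by
              have : j < j' := (List.pairwise_cons.mp hsort).1 j' hj'
              omega)
        · -- incompatible match: A's `continue`, a no-op
          have hstep : pvStepA prices query i (s0, e0) j = (s0, e0) := by
            unfold pvStepA
            rw [if_pos hm, if_pos (by simp; omega)]
          have : ((PySem.List.pyGetD prices j 0 == PySem.List.pyGetD prices i 0 + query)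
                   && decide (max (i+1) (max s0 (i+1) - 1) ≤ j)) = false := by
            simp [hcomp]
          rw [hstep, this]
          exact ih (List.pairwise_cons.mp hsort).2 (fun j' hj' => hmem j' (by simp [hj']))
      · have hstep : pvStepA prices query i (s0, e0) j = (s0, e0) := by
          unfold pvStepA; rw [if_neg hm]
        have : ((PySem.List.pyGetD prices j 0 == PySem.List.pyGetD prices i 0 + query)
                 && decide (max (i+1) (max s0 (i+1) - 1) ≤ j)) = false := by
          simp only [Bool.and_eq_false_iff]; left; simpa using hm
        rw [hstep, this]
        exact ih (List.pairwise_cons.mp hsort).2 (fun j' hj' => hmem j' (by simp [hj']))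

-- the per-i steps of A and B agree on states with st.1 ≤ st.2
theorem pvStep_eq (prices : List Int) (query i : Int) (st : Int × Int)
    (hi : 0 ≤ i) (hin : i < (prices.length : Int)) (hse : st.1 ≤ st.2) :
    (PySem.List.pyRange (i+1) prices.length 1).foldl (pvStepA prices query i) st =
      pvStepB prices query st i := by
  obtain ⟨s0, e0⟩ := st
  simp only at hse
  unfold pvStepB
  set t := PySem.List.pyGetD prices i 0 + query with ht
  set lst := (pvPos prices).getD t [] with hlst
  have hlstval : lst = (PySem.List.pyRange 0 prices.length 1).filter
      (fun j => PySem.List.pyGetD prices j 0 == t) := pvPos_getD prices t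
  set s := max s0 (i+1) with hs
  set lo := max (i+1) (s-1) with hlo
  by_cases hstuck : s > e0
  · rw [if_pos hstuck]
    exact pvScanA_stuck prices query i _ s0 e0 (by omega)
  · rw [if_neg hstuck]
    have hsortlst : lst.Pairwise (· < ·) := by
      rw [hlstval]; exact (PySem.List.pairwise_lt_pyRange_one 0 prices.length).filter _
    have hmono : ∀ k k', k ≤ k' → k' < lst.length → lst.getD k 0 ≤ lst.getD k' 0 := by
      intro k k' hkk hk'
      rcases Nat.eq_or_lt_of_le hkk with rfl | hlt
      · exact le_rfl
      · have := List.pairwise_iff_getElem.mp hsortlst k k' (by omega) hk' hlt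
        rw [List.getD_eq_getElem lst 0 (by omega), List.getD_eq_getElem lst 0 hk']
        omega
    set r := pvBsearch lst lo 0 lst.length lst.length with hr
    have hspec := pvBsearch_spec lst lo lst.length 0 lst.length (by omega) (le_refl _)
      (Nat.zero_le _) hmono (by omega) (fun k hk hk2 => by omega)
    have hfind := pvFind_of_boundary lst lo r hspec.2.1 hspec.1 hspec.2.2
    rw [pvScanA prices query i _ s0 e0
      (PySem.List.pairwise_lt_pyRange_one _ _)
      (fun j hj => ((PySem.List.mem_pyRange_one).mp hj).1) hse (by omega)]
    have hsplit : PySem.List.pyRange 0 prices.length 1 =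
        PySem.List.pyRange 0 (i+1) 1 ++ PySem.List.pyRange (i+1) prices.length 1 :=
      PySem.List.pyRange_one_append 0 (i+1) prices.length (by omega) (by omega)
    have hfind2 : lst.find? (fun x => decide (lo ≤ x)) =
        (PySem.List.pyRange (i+1) prices.length 1).find?
          (fun j => (PySem.List.pyGetD prices j 0 == t) && decide (lo ≤ j)) := by
      rw [hlstval, pvFind_filter, hsplit, List.find?_append]
      have : (PySem.List.pyRange 0 (i+1) 1).find?
          (fun j => (PySem.List.pyGetD prices j 0 == t) && decide (lo ≤ j)) = none := by
        rw [List.find?_eq_none]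
        intro j hj
        have := (PySem.List.mem_pyRange_one).mp hj
        simp only [Bool.and_eq_true, decide_eq_true_eq, not_and]
        intro _
        omega
      rw [this, Option.none_or]
    rw [← hfind2, hfind]
    by_cases hrlen : r < lst.length
    · rw [if_pos hrlen, if_pos hrlen]
    · rw [if_neg hrlen, if_neg hrlen]

-- A's inner loop keeps start ≤ end
theorem pvStepA_inv (prices : List Int) (query i : Int) (st : Int × Int) (j : Int)
    (hse : st.1 ≤ st.2) : (pvStepA prices query i st j).1 ≤ (pvStepA prices query i st j).2 := by
  unfold pvStepA
  split
  · split
    · exact hse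
    · simp only; omega
  · exact hse

theorem pvFoldA_inv (prices : List Int) (query i : Int) (js : List Int) (st : Int × Int)
    (hse : st.1 ≤ st.2) :
    (js.foldl (pvStepA prices query i) st).1 ≤ (js.foldl (pvStepA prices query i) st).2 := by
  induction js generalizing st with
  | nil => exact hse
  | cons j js ih => exact ih _ (pvStepA_inv prices query i st j hse)

-- the whole per-query loops agree
theorem pvFold_eq (prices : List Int) (query : Int) (is : List Int) (st : Int × Int)
    (hse : st.1 ≤ st.2) (hmem : ∀ i ∈ is, 0 ≤ i ∧ i < (prices.length : Int)) :
    is.foldl (fun st i => (PySem.List.pyRange (i+1) prices.length 1).foldl (pvStepA prices query i) st) st =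
      is.foldl (pvStepB prices query) st := by
  induction is generalizing st with
  | nil => rfl
  | cons i is ih =>
      obtain ⟨hi0, hin⟩ := hmem i (by simp)
      rw [List.foldl_cons, List.foldl_cons, pvStep_eq prices query i st hi0 hin hse]
      exact ih _ (by
        rw [← pvStep_eq prices query i st hi0 hin hse]
        exact pvFoldA_inv prices query i _ st hse)
        (fun i' hi' => hmem i' (by simp [hi']))

-- ===== VERDICT (by name: the statement is the Claim_ definition above) =====
theorem find_min_days_spec : Claim_equal_find_min_days := by
  intro prices profit _
  unfold Spec_find_min_days find_min_days find_min_days_alt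
  apply PySem.List.foldl_congr_mem
  intro ans query hq
  simp only
  rw [show (fun (st : Int × Int) (i : Int) =>
      (PySem.List.pyRange (i+1) prices.length 1).foldl (fun (st : Int × Int) j =>
        if PySem.List.pyGetD prices j 0 == PySem.List.pyGetD prices i 0 + query then
          if max st.1 (i+1) > min st.2 (j+1) then st
          else (max st.1 (i+1), min st.2 (j+1))
        else st) st) = (fun st i => (PySem.List.pyRange (i+1) prices.length 1).foldl (pvStepA prices query i) st) from rfl]
  rw [pvFold_eq prices query _ _ (by norm_num)
    (fun i hi => by
      have := (PySem.List.mem_pyRange_one).mp hi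
      exact ⟨this.1, this.2⟩)]
  rw [show (PySem.List.pyRange 0 prices.length 1).foldl (pvStepB prices query) ((-1 : Int), (99999 : Int)) =
      (PySem.List.pyRange 0 prices.length 1).foldl (fun (st : Int × Int) (i : Int) =>
      let s := max st.1 (i + 1)
      if s > st.2 then st
      else
        let lst := ((PySem.List.enumerate prices 0).foldl
            (fun d p => d.modify p.2 [] (fun l => l ++ [p.1])) PySem.Dict.empty).getD (PySem.List.pyGetD prices i 0 + query) []
        let lo := max (i + 1) (s - 1)
        let r := pvBsearch lst lo 0 lst.length lst.length
        if r < lst.length then (s, min st.2 (lst.getD r 0 + 1)) else st) ((-1 : Int), (99999 : Int)) from rfl]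
  simp [List.append_assoc]
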